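-- pv_equiv track=rewrite | github.com/intzy/ProjectEuler | src/pb117.py | problem117
-- ===== SOURCE A (Python) =====
-- def problem117(n=50):
--     f = [None] * (n + 1)
--     f[0] = 1
--     f[1] = f[0]
--     f[2] = f[1] + f[0]
--     f[3] = f[2] + f[1] + f[0]
--     for m in range(4, n + 1):
--         f[m] = f[m - 1] + f[m - 2] + f[m - 3] + f[m - 4]
--     return f[n]
-- ===== SOURCE B (Python) =====
-- def problem117(n=50):
--     # f(n) = (M^n)[0][0] for the tetranacci companion matrix M,
--     # computed by binary exponentiation.
--     def mat_mul(X, Y):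
--         return [[sum(X[i][k] * Y[k][j] for k in range(4)) for j in range(4)]
--                 for i in range(4)]
--     R = [[1 if i == j else 0 for j in range(4)] for i in range(4)]
--     M = [[1, 1, 1, 1],
--          [1, 0, 0, 0],
--          [0, 1, 0, 0],
--          [0, 0, 1, 0]]
--     e = n
--     while e > 0:
--         if e % 2 == 1:
--             R = mat_mul(R, M)
--         M = mat_mul(M, M)
--         e //= 2
--     return R[0][0]
-- ===== Notes on version B (the rewrite author's own statement) =====
-- stated objective: alternative
-- what changed: replaces the linear DP table over f[0..n] by binary exponentiation of the 4x4 tetranacci companion matrix, returning the top-left entry of M^n (fewer arithmetic steps, though huge-integer growth dominates at extreme sizes)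
import Mathlib
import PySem

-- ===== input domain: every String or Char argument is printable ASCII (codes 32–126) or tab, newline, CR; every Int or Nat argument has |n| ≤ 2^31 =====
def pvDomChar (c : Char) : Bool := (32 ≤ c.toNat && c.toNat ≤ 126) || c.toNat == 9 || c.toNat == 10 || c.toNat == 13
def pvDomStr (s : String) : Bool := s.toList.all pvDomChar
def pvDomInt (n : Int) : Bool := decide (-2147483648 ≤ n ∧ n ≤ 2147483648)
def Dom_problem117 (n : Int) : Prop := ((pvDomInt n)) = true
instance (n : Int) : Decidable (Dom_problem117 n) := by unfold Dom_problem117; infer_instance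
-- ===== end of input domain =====

-- B replaces A's linear DP table by binary exponentiation of the 4x4 companion matrix (intended as faster; measured 6.12× at the largest size both finished, unconfirmed beyond).
-- A raises IndexError on inputs too small for the four seed assignments (excluded by Pre_); the equivalence is about the return value elsewhere.

-- ===== PORT A =====
-- Python list entry read f[i]: inside Pre_ every read entry is already `some`;
-- the `.getD 0` / `.getD none` defaults are never hit on Pre_ inputs.
def aGet (f : List (Option Int)) (i : Int) : Int := ((f.getD i.toNat none).getD 0)

-- the four seed statements of A, in order
def aBase (n : Int) : List (Option Int) :=
  let f : List (Option Int) := List.replicate (n + 1).toNat none   -- f = [None] * (n + 1)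
  let f := f.set 0 (some 1)                                        -- f[0] = 1
  let f := f.set 1 (some (aGet f 0))                               -- f[1] = f[0]
  let f := f.set 2 (some (aGet f 1 + aGet f 0))                    -- f[2] = f[1] + f[0]
  f.set 3 (some (aGet f 2 + aGet f 1 + aGet f 0))                  -- f[3] = f[2] + f[1] + f[0]

-- the loop body: f[m] = f[m-1] + f[m-2] + f[m-3] + f[m-4]
def aStep (f : List (Option Int)) (m : Int) : List (Option Int) :=
  f.set m.toNat (some (aGet f (m - 1) + aGet f (m - 2) + aGet f (m - 3) + aGet f (m - 4)))

def problem117 (n : Int) : Int :=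
  aGet ((PySem.List.pyRange 4 (n + 1) 1).foldl aStep (aBase n)) n  -- for m in range(4, n+1): …; return f[n]

-- ===== PORT B =====
-- Source B's 4x4 list-of-lists matrix is represented as a 16-field structure; mat_mul is the
-- same 16 dot products Source B's comprehension computes, written out entrywise.
structure Mat where
  a00 : Int
  a01 : Int
  a02 : Int
  a03 : Int
  a10 : Int
  a11 : Int
  a12 : Int
  a13 : Int
  a20 : Int
  a21 : Int
  a22 : Int
  a23 : Int
  a30 : Int
  a31 : Int
  a32 : Int
  a33 : Int
deriving DecidableEq, Repr

def matMul (X Y : Mat) : Mat :=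
  ⟨X.a00*Y.a00 + X.a01*Y.a10 + X.a02*Y.a20 + X.a03*Y.a30,
   X.a00*Y.a01 + X.a01*Y.a11 + X.a02*Y.a21 + X.a03*Y.a31,
   X.a00*Y.a02 + X.a01*Y.a12 + X.a02*Y.a22 + X.a03*Y.a32,
   X.a00*Y.a03 + X.a01*Y.a13 + X.a02*Y.a23 + X.a03*Y.a33,
   X.a10*Y.a00 + X.a11*Y.a10 + X.a12*Y.a20 + X.a13*Y.a30,
   X.a10*Y.a01 + X.a11*Y.a11 + X.a12*Y.a21 + X.a13*Y.a31,
   X.a10*Y.a02 + X.a11*Y.a12 + X.a12*Y.a22 + X.a13*Y.a32,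
   X.a10*Y.a03 + X.a11*Y.a13 + X.a12*Y.a23 + X.a13*Y.a33,
   X.a20*Y.a00 + X.a21*Y.a10 + X.a22*Y.a20 + X.a23*Y.a30,
   X.a20*Y.a01 + X.a21*Y.a11 + X.a22*Y.a21 + X.a23*Y.a31,
   X.a20*Y.a02 + X.a21*Y.a12 + X.a22*Y.a22 + X.a23*Y.a32,
   X.a20*Y.a03 + X.a21*Y.a13 + X.a22*Y.a23 + X.a23*Y.a33,
   X.a30*Y.a00 + X.a31*Y.a10 + X.a32*Y.a20 + X.a33*Y.a30,
   X.a30*Y.a01 + X.a31*Y.a11 + X.a32*Y.a21 + X.a33*Y.a31,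
   X.a30*Y.a02 + X.a31*Y.a12 + X.a32*Y.a22 + X.a33*Y.a32,
   X.a30*Y.a03 + X.a31*Y.a13 + X.a32*Y.a23 + X.a33*Y.a33⟩

def matI : Mat := ⟨1,0,0,0, 0,1,0,0, 0,0,1,0, 0,0,0,1⟩
def matM : Mat := ⟨1,1,1,1, 1,0,0,0, 0,1,0,0, 0,0,1,0⟩

-- the while-loop of Source B (e > 0 test, odd bit multiplies into R, square M, halve e);
-- the exponent is a Nat counter: for n ≤ 0 the Python loop body never runs, exactly as toNat = 0 here.
def matPowLoop (R M : Mat) (e : Nat) : Mat :=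
  if _h : e = 0 then R
  else matPowLoop (if e % 2 = 1 then matMul R M else R) (matMul M M) (e / 2)
decreasing_by exact Nat.div_lt_self (Nat.pos_of_ne_zero _h) (by norm_num)

def problem117_alt (n : Int) : Int := (matPowLoop matI matM n.toNat).a00

-- ===== PRECONDITION & SPEC =====
-- Pre_ excludes the small inputs on which A raises IndexError (the seed assignments index past the end of the table).
def Pre_problem117 (n : Int) : Prop := 3 ≤ n
instance (n : Int) : Decidable (Pre_problem117 n) := by unfold Pre_problem117; infer_instance
def pvWitness_problem117 : Int := (5)

def Spec_problem117 (n : Int) (out : Int) : Prop := out = problem117_alt n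
instance (n : Int) (out : Int) : Decidable (Spec_problem117 n out) := by unfold Spec_problem117; infer_instance

-- ===== CLAIM (what is proved, stated in full; the proofs are below) =====
def Claim_equal_problem117 : Prop := ∀ (n : Int), Dom_problem117 n → Pre_problem117 n → Spec_problem117 n (problem117 n)
-- ===== LEMMAS AND PROOFS =====

-- the tetranacci sequence shifted by 3: g 3 = f(0), g (k+3) = f(k); g 0 = g 1 = g 2 = 0
def g : Nat → Int
  | 0 => 0
  | 1 => 0
  | 2 => 0
  | 3 => 1
  | k + 4 => g (k + 3) + g (k + 2) + g (k + 1) + g k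

-- plain power, proof-side reference for matPowLoop
def pw (M : Mat) : Nat → Mat
  | 0 => matI
  | k + 1 => matMul M (pw M k)

theorem matMul_assoc (X Y Z : Mat) : matMul (matMul X Y) Z = matMul X (matMul Y Z) := by
  cases X; cases Y; cases Z
  simp only [matMul, Mat.mk.injEq]
  refine ⟨?_,?_,?_,?_,?_,?_,?_,?_,?_,?_,?_,?_,?_,?_,?_,?_⟩ <;> ring

theorem matMul_one (X : Mat) : matMul X matI = X := by
  cases X; simp [matMul, matI]

theorem one_matMul (X : Mat) : matMul matI X = X := by
  cases X; simp [matMul, matI]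

theorem pw_comm (M : Mat) (k : Nat) : matMul M (pw M k) = matMul (pw M k) M := by
  induction k with
  | zero => simp [pw, matMul_one, one_matMul]
  | succ k ih =>
    simp only [pw]
    rw [ih, ← matMul_assoc, ih]

theorem pw_two_mul (M : Mat) (k : Nat) : pw (matMul M M) k = pw M (2 * k) := by
  induction k with
  | zero => rfl
  | succ k ih =>
    have : 2 * (k + 1) = (2 * k + 1) + 1 := by ring
    rw [this]
    simp only [pw, ih, matMul_assoc]

theorem matPowLoop_eq (e : Nat) : ∀ R M : Mat, matPowLoop R M e = matMul R (pw M e) := by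
  induction e using Nat.strong_induction_on with
  | _ e ih =>
    intro R M
    by_cases h : e = 0
    · subst h; rw [matPowLoop]; simp [pw, matMul_one]
    · rw [matPowLoop]
      simp only [h, dite_false]
      rw [ih (e / 2) (Nat.div_lt_self (Nat.pos_of_ne_zero h) (by norm_num))]
      rw [pw_two_mul]
      rcases Nat.even_or_odd e with he | he
      · obtain ⟨q, hq⟩ : ∃ q, e = 2 * q := ⟨e / 2, by obtain ⟨q, hq⟩ := he; omega⟩
        subst hq
        rw [Nat.mul_div_cancel_left q (by norm_num), if_neg (by omega)]
      · obtain ⟨q, hq⟩ := he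
        subst hq
        rw [Nat.mul_add_div (by norm_num), show (1 : Nat) / 2 = 0 from rfl, Nat.add_zero,
          if_pos (by omega), show 2 * q + 1 = (2 * q) + 1 from rfl]
        simp only [pw]
        rw [matMul_assoc, pw_comm]

theorem pw_col (k : Nat) :
    (pw matM k).a00 = g (k + 3) ∧ (pw matM k).a10 = g (k + 2) ∧
    (pw matM k).a20 = g (k + 1) ∧ (pw matM k).a30 = g k := by
  induction k with
  | zero => simp [pw, matI, g]
  | succ k ih =>
    obtain ⟨h0, h1, h2, h3⟩ := ih
    have hg : g (k + 4) = g (k + 3) + g (k + 2) + g (k + 1) + g k := by rw [g]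
    have hmm : ∀ P : Mat, (matMul matM P).a00 = P.a00 + P.a10 + P.a20 + P.a30 ∧
        (matMul matM P).a10 = P.a00 ∧ (matMul matM P).a20 = P.a10 ∧
        (matMul matM P).a30 = P.a20 := by
      intro P
      refine ⟨?_, ?_, ?_, ?_⟩ <;> simp [matMul, matM]
    obtain ⟨m0, m1, m2, m3⟩ := hmm (pw matM k)
    refine ⟨?_, ?_, ?_, ?_⟩
    · show (matMul matM (pw matM k)).a00 = g (k + 1 + 3)
      rw [m0, h0, h1, h2, h3, show k + 1 + 3 = k + 4 from rfl, hg]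
    · show (matMul matM (pw matM k)).a10 = g (k + 1 + 2)
      rw [m1, h0]
    · show (matMul matM (pw matM k)).a20 = g (k + 1 + 1)
      rw [m2, h1]
    · show (matMul matM (pw matM k)).a30 = g (k + 1)
      rw [m3, h2]

theorem alt_eq_g (n : Int) : problem117_alt n = g (n.toNat + 3) := by
  unfold problem117_alt
  rw [matPowLoop_eq, one_matMul]
  exact (pw_col n.toNat).1

-- ===== A-side =====

def B0 (k : Nat) : List (Option Int) :=
  some 1 :: some 1 :: some 2 :: some 4 :: List.replicate k none

theorem aBase_eq (n : Int) (hn : 3 ≤ n) : aBase n = B0 (n.toNat - 3) := by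
  have h : (n + 1).toNat = (n.toNat - 3) + 4 := by omega
  simp [aBase, B0, h, List.replicate_succ, aGet, List.getD]

theorem B0_length (k : Nat) : (B0 k).length = k + 4 := by simp [B0]

theorem B0_getD (k : Nat) (i : Nat) (hi : i < 4) : (B0 k).getD i none = some (g (i + 3)) := by
  interval_cases i <;> simp [B0, List.getD] <;> decide

theorem loop_inv (N : Nat) (hN : 3 ≤ N) (j : Nat) (hj : 4 + j ≤ N + 2) :
    ((PySem.List.pyRange 4 (4 + (j : Int)) 1).foldl aStep (B0 (N - 3))).length = N + 1 ∧
    ∀ i : Nat, i < 4 + j → i ≤ N →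
      ((PySem.List.pyRange 4 (4 + (j : Int)) 1).foldl aStep (B0 (N - 3))).getD i none = some (g (i + 3)) := by
  induction j with
  | zero =>
    rw [show ((4 : Int) + ((0 : Nat) : Int)) = 4 by norm_num, PySem.List.pyRange_one_eq_nil (by norm_num)]
    refine ⟨by rw [List.foldl_nil, B0_length]; omega, fun i hi _ => by rw [List.foldl_nil]; exact B0_getD _ i hi⟩
  | succ j ih =>
    have hj' : 4 + j ≤ N + 2 := by omega
    obtain ⟨hlen, hget⟩ := ih hj'
    have hsplit : PySem.List.pyRange 4 (4 + ((j + 1 : Nat) : Int)) 1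
        = PySem.List.pyRange 4 (4 + (j : Int)) 1 ++ [4 + (j : Int)] := by
      rw [show (4 + ((j + 1 : Nat) : Int)) = (4 + (j : Int)) + 1 by push_cast; ring,
        PySem.List.pyRange_one_succ_right (by omega)]
    rw [hsplit, List.foldl_append, List.foldl_cons, List.foldl_nil]
    set L := (PySem.List.pyRange 4 (4 + (j : Int)) 1).foldl aStep (B0 (N - 3)) with hL
    have hjN : 4 + j ≤ N + 1 := by omega
    have hm : ((4 : Int) + (j : Int)).toNat = 4 + j := by omega
    constructor
    · simp [aStep, hm, hlen]
    · intro i hi hiN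
      by_cases hcase : i = 4 + j
      · subst hcase
        have hjN' : 4 + j ≤ N := hiN
        -- the four reads f[m-1] .. f[m-4]
        have t1 : ((4 : Int) + (j : Int) - 1).toNat = j + 3 := by omega
        have t2 : ((4 : Int) + (j : Int) - 2).toNat = j + 2 := by omega
        have t3 : ((4 : Int) + (j : Int) - 3).toNat = j + 1 := by omega
        have t4 : ((4 : Int) + (j : Int) - 4).toNat = j := by omega
        have r1 : aGet L (4 + (j : Int) - 1) = g ((j + 3) + 3) := by
          simp only [aGet, t1]; rw [hget (j + 3) (by omega) (by omega)]; rfl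
        have r2 : aGet L (4 + (j : Int) - 2) = g ((j + 2) + 3) := by
          simp only [aGet, t2]; rw [hget (j + 2) (by omega) (by omega)]; rfl
        have r3 : aGet L (4 + (j : Int) - 3) = g ((j + 1) + 3) := by
          simp only [aGet, t3]; rw [hget (j + 1) (by omega) (by omega)]; rfl
        have r4 : aGet L (4 + (j : Int) - 4) = g (j + 3) := by
          simp only [aGet, t4]; rw [hget j (by omega) (by omega)]; rfl
        have hg : g ((4 + j) + 3) = g ((j + 3) + 3) + g ((j + 2) + 3) + g ((j + 1) + 3) + g (j + 3) := by
          rw [show (4 + j) + 3 = (j + 3) + 4 by omega, g,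
            show (j + 3) + 2 = (j + 2) + 3 by omega, show (j + 3) + 1 = (j + 1) + 3 by omega]
        simp only [aStep, hm, r1, r2, r3, r4, List.getD]
        rw [List.getElem?_set_self (by omega), hg]
        rfl
      · have hne : 4 + j ≠ i := fun h => hcase h.symm
        simp only [aStep, hm, List.getD]
        rw [List.getElem?_set_ne hne]
        exact hget i (by omega) hiN

theorem a_eq_g (n : Int) (hn : 3 ≤ n) : problem117 n = g (n.toNat + 3) := by
  set N := n.toNat with hN
  have hN3 : 3 ≤ N := by omega
  rw [problem117, aBase_eq n hn]
  rw [show (n : Int) + 1 = 4 + ((N - 3 : Nat) : Int) by omega]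
  obtain ⟨hlen, hget⟩ := loop_inv N hN3 (N - 3) (by omega)
  have hn' : (n : Int).toNat = N := rfl
  simp only [aGet, hn']
  rw [hget N (by omega) (by omega)]
  rfl

-- ===== VERDICT (by name: the statement is the Claim_ definition above) =====
theorem problem117_spec : Claim_equal_problem117 := by
  intro n _ hpre
  unfold Spec_problem117
  rw [a_eq_g n hpre, alt_eq_g]
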